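-- pv_equiv track=rewrite | github.com/laichunpongben/natural_language_processing | text_normalization_en/normalize.py | normalize_telephone
-- ===== SOURCE A (Python) =====
-- def normalize_telephone(text):
--     d = {
--         '1': 'one',
--         '2': 'two',
--         '3': 'three',
--         '4': 'four',
--         '5': 'five',
--         '6': 'six',
--         '7': 'seven',
--         '8': 'eight',
--         '9': 'nine',
--         '0': 'o',
--         '-': 'sil',
--         '.': 'dot'
--     }
--
--     text_ = text.replace('(', '')
--     text_ = text_.replace(')', '')
--     text_ = text_.replace(' ', '-')
--     text_ = " ".join(text_)
--     for k, v in d.items():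
--         text_ = text_.replace(k, v)
--     return text_
-- ===== SOURCE B (Python) =====
-- def normalize_telephone(text):
--     d = {
--         '1': 'one',
--         '2': 'two',
--         '3': 'three',
--         '4': 'four',
--         '5': 'five',
--         '6': 'six',
--         '7': 'seven',
--         '8': 'eight',
--         '9': 'nine',
--         '0': 'o',
--         '-': 'sil',
--         '.': 'dot'
--     }
--     cleaned = text.replace('(', '').replace(')', '').replace(' ', '-')
--     return ' '.join(d.get(ch, ch) for ch in cleaned)
-- ===== Notes on version B (the rewrite author's own statement) =====
-- stated objective: simpler
-- what changed: A joins the cleaned characters with spaces and then runs 12 global str.replace passes (one per dict entry) over the whole string; B makes one left-to-right pass, mapping each cleaned character through the dict and joining the words once (safe because no replacement word contains a dict key).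
import Mathlib
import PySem

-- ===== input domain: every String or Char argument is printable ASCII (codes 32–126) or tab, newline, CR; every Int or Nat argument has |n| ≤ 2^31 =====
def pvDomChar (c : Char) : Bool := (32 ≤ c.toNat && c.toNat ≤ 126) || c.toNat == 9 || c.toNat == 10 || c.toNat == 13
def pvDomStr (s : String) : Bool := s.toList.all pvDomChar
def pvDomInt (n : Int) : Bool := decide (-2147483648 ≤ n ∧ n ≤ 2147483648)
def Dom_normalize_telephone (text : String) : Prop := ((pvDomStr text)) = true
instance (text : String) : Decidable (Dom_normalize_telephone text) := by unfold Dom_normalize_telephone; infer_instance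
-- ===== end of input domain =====

-- B replaces A's 12 global str.replace passes over the space-joined string by a single
-- left-to-right pass mapping each character through the dict (objective: simpler).

-- the substitution dict of both programs; its keys are the single characters '1'…'0', '-', '.'
def pvD : PySem.Dict Char String := PySem.Dict.mk
  [('1', "one"), ('2', "two"), ('3', "three"), ('4', "four"), ('5', "five"), ('6', "six"),
   ('7', "seven"), ('8', "eight"), ('9', "nine"), ('0', "o"), ('-', "sil"), ('.', "dot")]

-- ===== PORT A =====
def normalize_telephone (text : String) : String :=
  let text1 := PySem.Str.replace text "(" ""
  let text2 := PySem.Str.replace text1 ")" ""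
  let text3 := PySem.Str.replace text2 " " "-"
  let text4 := PySem.Str.join " " (text3.toList.map (fun c => String.ofList [c]))
  pvD.items.foldl (fun s kv => PySem.Str.replace s (String.ofList [kv.1]) kv.2) text4

-- ===== PORT B =====
def normalize_telephone_alt (text : String) : String :=
  let cleaned := PySem.Str.replace (PySem.Str.replace (PySem.Str.replace text "(" "") ")" "") " " "-"
  PySem.Str.join " " (cleaned.toList.map (fun c => pvD.getD c (String.ofList [c])))

-- ===== PRECONDITION & SPEC =====
def Spec_normalize_telephone (text : String) (out : String) : Prop := out = normalize_telephone_alt text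
instance (text : String) (out : String) : Decidable (Spec_normalize_telephone text out) := by unfold Spec_normalize_telephone; infer_instance

-- ===== CLAIM (what is proved, stated in full; the proofs are below) =====
def Claim_equal_normalize_telephone : Prop := ∀ (text : String), Dom_normalize_telephone text → Spec_normalize_telephone text (normalize_telephone text)

-- ===== LEMMAS AND PROOFS =====

-- replacing a single-character pattern acts independently on every character
def pvStep (k : Char) (v : List Char) (s : List Char) : List Char :=
  s.flatMap (fun c => if c = k then v else [c])

theorem pv_go_single (k : Char) (v : List Char) :
    ∀ (l : List Char) (fuel : Nat) (acc : List Char), l.length ≤ fuel →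
      PySem.Chars.replace.go [k] v fuel l acc = acc.reverse ++ pvStep k v l := by
  intro l
  induction l with
  | nil =>
    intro fuel acc _
    cases fuel <;> simp [PySem.Chars.replace.go, pvStep]
  | cons c t ih =>
    intro fuel acc h
    cases fuel with
    | zero => simp at h
    | succ n =>
      rw [PySem.Chars.replace.go]
      have hp : ([k].isPrefixOf (c :: t)) = (k == c) := by simp [List.isPrefixOf]
      rw [hp]
      by_cases hc : c = k
      · subst hc
        simp only [beq_self_eq_true, if_true, List.length_cons, List.length_nil, Nat.zero_add,
          List.drop_succ_cons, List.drop_zero]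
        rw [ih n (v.reverse ++ acc) (by simpa using h)]
        simp [pvStep]
      · have hk : (k == c) = false := by
          simp only [beq_eq_false_iff_ne, ne_eq]
          exact fun h' => hc h'.symm
        rw [hk]
        simp only [Bool.false_eq_true, if_false]
        rw [ih n (c :: acc) (by simpa using h)]
        simp [pvStep, hc]

theorem pv_replace_single (s : List Char) (k : Char) (v : List Char) :
    PySem.Chars.replace s [k] v = pvStep k v s := by
  rw [PySem.Chars.replace]
  simp only [List.isEmpty_cons, Bool.false_eq_true, if_false]
  simpa using pv_go_single k v s s.length [] (le_refl _)

-- the 12 substitution passes of A, composed (innermost first = dict order)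
def pvF (s : List Char) : List Char :=
  pvStep '.' "dot".toList (pvStep '-' "sil".toList (pvStep '0' "o".toList
    (pvStep '9' "nine".toList (pvStep '8' "eight".toList (pvStep '7' "seven".toList
      (pvStep '6' "six".toList (pvStep '5' "five".toList (pvStep '4' "four".toList
        (pvStep '3' "three".toList (pvStep '2' "two".toList (pvStep '1' "one".toList s)))))))))))

theorem pvStep_append (k : Char) (v a b : List Char) :
    pvStep k v (a ++ b) = pvStep k v a ++ pvStep k v b := by
  simp [pvStep]

theorem pvF_append (a b : List Char) : pvF (a ++ b) = pvF a ++ pvF b := by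
  simp [pvF, pvStep_append]

theorem pvF_singleton (c : Char) : pvF [c] = (pvD.getD c (String.ofList [c])).toList := by
  by_cases h1 : '1' = c; · subst h1; decide
  by_cases h2 : '2' = c; · subst h2; decide
  by_cases h3 : '3' = c; · subst h3; decide
  by_cases h4 : '4' = c; · subst h4; decide
  by_cases h5 : '5' = c; · subst h5; decide
  by_cases h6 : '6' = c; · subst h6; decide
  by_cases h7 : '7' = c; · subst h7; decide
  by_cases h8 : '8' = c; · subst h8; decide
  by_cases h9 : '9' = c; · subst h9; decide
  by_cases h0 : '0' = c; · subst h0; decide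
  by_cases hm : '-' = c; · subst hm; decide
  by_cases hd : '.' = c; · subst hd; decide
  have b1 : ('1' == c) = false := by simp [h1]
  have b2 : ('2' == c) = false := by simp [h2]
  have b3 : ('3' == c) = false := by simp [h3]
  have b4 : ('4' == c) = false := by simp [h4]
  have b5 : ('5' == c) = false := by simp [h5]
  have b6 : ('6' == c) = false := by simp [h6]
  have b7 : ('7' == c) = false := by simp [h7]
  have b8 : ('8' == c) = false := by simp [h8]
  have b9 : ('9' == c) = false := by simp [h9]
  have b0 : ('0' == c) = false := by simp [h0]
  have bm : ('-' == c) = false := by simp [hm]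
  have bd : ('.' == c) = false := by simp [hd]
  simp [pvF, pvStep, pvD, PySem.Dict.getD, PySem.Dict.get?, b1, b2, b3, b4, b5, b6, b7, b8, b9, b0, bm, bd, Ne.symm h1, Ne.symm h2, Ne.symm h3, Ne.symm h4, Ne.symm h5, Ne.symm h6, Ne.symm h7, Ne.symm h8, Ne.symm h9, Ne.symm h0, Ne.symm hm, Ne.symm hd]

theorem pvF_space : pvF [' '] = [' '] := by decide

theorem pvF_join (cs : List Char) :
    pvF (PySem.Chars.join [' '] (cs.map (fun c => [c])))
      = PySem.Chars.join [' '] (cs.map (fun c => (pvD.getD c (String.ofList [c])).toList)) := by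
  induction cs with
  | nil => rfl
  | cons c cs ih =>
    cases cs with
    | nil => simp only [List.map_cons, List.map_nil, PySem.Chars.join_singleton, pvF_singleton]
    | cons c' rest =>
      simp only [List.map_cons] at ih ⊢
      rw [PySem.Chars.join_cons_cons, PySem.Chars.join_cons_cons, pvF_append, pvF_append,
        pvF_singleton, pvF_space, ih]

theorem pv_main (cs : List Char) :
    pvD.items.foldl (fun s kv => PySem.Str.replace s (String.ofList [kv.1]) kv.2)
        (PySem.Str.join " " (cs.map (fun c => String.ofList [c])))
      = PySem.Str.join " " (cs.map (fun c => pvD.getD c (String.ofList [c]))) := by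
  apply String.toList_inj.mp
  have hitems : pvD.items = [('1', "one"), ('2', "two"), ('3', "three"), ('4', "four"),
      ('5', "five"), ('6', "six"), ('7', "seven"), ('8', "eight"), ('9', "nine"),
      ('0', "o"), ('-', "sil"), ('.', "dot")] := rfl
  rw [hitems]
  simp only [List.foldl_cons, List.foldl_nil, PySem.Str.toList_replace, PySem.Str.toList_join,
    String.toList_ofList, pv_replace_single, List.map_map, Function.comp_def]
  have h := pvF_join cs
  simp only [pvF] at h
  exact h

-- ===== VERDICT (by name: the statement is the Claim_ definition above) =====
theorem normalize_telephone_spec : Claim_equal_normalize_telephone := by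
  intro text _
  unfold Spec_normalize_telephone normalize_telephone normalize_telephone_alt
  exact pv_main _
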